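-- pv_equiv track=rewrite | github.com/fabmedeiros/ciphers | ciphers/polybius.py | create_square
-- ===== SOURCE A (Python) =====
-- def create_square(alphabet, lines):
--     '''
--     Retorna uma tabela lista quadrada definida por lines
--     com cada celula preenchida com um caracter de alphabet
--     '''
--     square = []
--     temp = []
--     count = 0
--     for ch in alphabet:
--         temp.append(ch)
--         count += 1
--         if count == lines:
--             square.append(temp)
--             temp = []
--             count = 0
--     return square
-- ===== SOURCE B (Python) =====
-- def create_square(alphabet, lines):
--     if lines <= 0 or lines > len(alphabet):
--         return []
--     return [list(chunk) for chunk in zip(*[iter(alphabet)] * lines)]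
-- ===== Notes on version B (the rewrite author's own statement) =====
-- stated objective: idiomatic
-- what changed: Replaces the counter+buffer accumulation loop with the grouper idiom (zip over a shared iterator), which takes whole rows of size `lines` at a time and drops the trailing partial row.
import Mathlib
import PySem

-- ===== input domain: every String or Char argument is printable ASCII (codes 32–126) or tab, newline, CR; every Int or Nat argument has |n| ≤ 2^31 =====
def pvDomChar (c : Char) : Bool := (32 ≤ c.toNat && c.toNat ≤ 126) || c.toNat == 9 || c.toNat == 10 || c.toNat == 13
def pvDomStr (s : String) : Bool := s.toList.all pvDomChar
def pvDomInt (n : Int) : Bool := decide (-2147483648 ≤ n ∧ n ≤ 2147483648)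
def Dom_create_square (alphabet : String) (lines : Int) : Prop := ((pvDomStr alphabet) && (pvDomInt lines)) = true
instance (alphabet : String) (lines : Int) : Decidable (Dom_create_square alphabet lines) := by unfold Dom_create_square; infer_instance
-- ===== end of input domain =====

-- B replaces A's counter+buffer loop with the grouper idiom (rows of size `lines` taken whole, trailing partial row dropped); objective: idiomatic.

-- ===== PORT A =====
-- loop body of A: state = (square, temp, count)
def stepA (lines : Int) (st : List (List String) × List String × Int) (ch : Char) :
    List (List String) × List String × Int :=
  let temp := st.2.1 ++ [String.mk [ch]]
  let count := st.2.2 + 1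
  if count = lines then (st.1 ++ [temp], [], 0) else (st.1, temp, count)

def create_square (alphabet : String) (lines : Int) : List (List String) :=
  (alphabet.toList.foldl (stepA lines) ([], [], 0)).1

-- ===== PORT B =====
-- one zip step of the grouper: take a whole row of n chars, recurse on the rest; stop when fewer than n remain
def grouper (n : Nat) (l : List Char) : List (List String) :=
  if h : 0 < n ∧ n ≤ l.length then
    (l.take n).map (fun c => String.mk [c]) :: grouper n (l.drop n)
  else []
termination_by l.length
decreasing_by simp; omega

def create_square_alt (alphabet : String) (lines : Int) : List (List String) :=
  if lines ≤ 0 ∨ (alphabet.toList.length : Int) < lines then []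
  else grouper lines.toNat alphabet.toList

-- ===== PRECONDITION & SPEC =====
def Spec_create_square (alphabet : String) (lines : Int) (out : List (List String)) : Prop := out = create_square_alt alphabet lines
instance (alphabet : String) (lines : Int) (out : List (List String)) : Decidable (Spec_create_square alphabet lines out) := by unfold Spec_create_square; infer_instance

-- ===== CLAIM (what is proved, stated in full; the proofs are below) =====
def Claim_equal_create_square : Prop := ∀ (alphabet : String) (lines : Int), Dom_create_square alphabet lines → Spec_create_square alphabet lines (create_square alphabet lines)

-- ===== LEMMAS AND PROOFS =====

-- with non-positive `lines`, A's `count == lines` never fires: square stays as it was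
lemma foldA_nonpos (lines : Int) (hl : lines ≤ 0) (l : List Char)
    (sq : List (List String)) (temp : List String) (count : Int) (hc : 0 ≤ count) :
    (l.foldl (stepA lines) (sq, temp, count)).1 = sq := by
  induction l generalizing temp count with
  | nil => rfl
  | cons ch l ih =>
      simp only [List.foldl_cons, stepA]
      rw [if_neg (by omega)]
      exact ih _ _ (by omega)

-- unfolding `grouper` on a list starting with one full row
lemma grouper_full (n : Nat) (hn : 0 < n) (row l : List Char) (hlen : row.length = n) :
    grouper n (row ++ l) = row.map (fun c => String.mk [c]) :: grouper n l := by
  rw [grouper, dif_pos ⟨hn, by simp [hlen]⟩]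
  simp [hlen]

-- invariant of A's loop for positive `lines`: the pending buffer `temp` holds the chars
-- consumed so far in the current row, `count = temp.length < lines`
lemma foldA_pos (n : Nat) (hn : 0 < n) (l : List Char) (sq : List (List String)) (temp : List Char)
    (hlt : temp.length < n) :
    (l.foldl (stepA (n : Int)) (sq, temp.map (fun c => String.mk [c]), (temp.length : Int))).1
      = sq ++ grouper n (temp ++ l) := by
  induction l generalizing sq temp with
  | nil =>
      rw [grouper]
      simp only [List.append_nil]
      rw [dif_neg (by omega)]
      simp
  | cons ch l ih =>
      simp only [List.foldl_cons, stepA]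
      by_cases hc : (temp.length : Int) + 1 = (n : Int)
      · rw [if_pos hc]
        have hlen : (temp ++ [ch]).length = n := by simp; omega
        have := ih (sq ++ [(temp ++ [ch]).map (fun c => String.mk [c])]) [] hn
        simp only [List.map_nil, List.length_nil, Nat.cast_zero, List.nil_append] at this
        rw [show (sq ++ [List.map (fun c => String.mk [c]) temp ++ [String.mk [ch]]] : List (List String))
              = sq ++ [(temp ++ [ch]).map (fun c => String.mk [c])] by simp]
        rw [this]
        have hsplit : temp ++ ch :: l = (temp ++ [ch]) ++ l := by simp
        rw [hsplit, grouper_full n hn (temp ++ [ch]) l hlen]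
        simp
      · rw [if_neg hc]
        have hlt' : (temp ++ [ch]).length < n := by simp; omega
        have := ih sq (temp ++ [ch]) hlt'
        simp only [List.map_append, List.map_cons, List.map_nil, List.length_append,
          List.length_cons, List.length_nil] at this ⊢
        rw [show ((temp.length : Int) + 1) = (((temp.length + 1 : Nat)) : Int) by push_cast; ring]
        simpa using this

-- ===== VERDICT (by name: the statement is the Claim_ definition above) =====
theorem create_square_spec : Claim_equal_create_square := by
  intro alphabet lines _
  unfold Spec_create_square create_square create_square_alt
  by_cases hl : lines ≤ 0
  · rw [if_pos (Or.inl hl : lines ≤ 0 ∨ (alphabet.toList.length : Int) < lines)]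
    exact foldA_nonpos lines hl _ [] [] 0 le_rfl
  · have hn : 0 < lines.toNat := by omega
    have hA := foldA_pos lines.toNat hn alphabet.toList [] [] hn
    simp only [List.map_nil, List.length_nil, Nat.cast_zero, List.nil_append] at hA
    rw [show ((lines.toNat : Int)) = lines by omega] at hA
    by_cases hbig : (alphabet.toList.length : Int) < lines
    · rw [if_pos (Or.inr hbig : lines ≤ 0 ∨ (alphabet.toList.length : Int) < lines), hA, grouper, dif_neg (by omega)]
    · rw [if_neg (by tauto), hA]
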